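-- pv_equiv track=rewrite | github.com/haddad9/KG- | create_dataset-checkpoint.py | read_after_first_blank_line
-- ===== SOURCE A (Python) =====
-- def read_after_first_blank_line(file_content):
--     content = []
--     blank_line_found = False
--
--     for line in file_content.splitlines():
--         if line.strip() == "":
--             blank_line_found = True
--             continue
--
--         if blank_line_found:
--             content.append(line)
--
--     return '\n'.join(content)
-- ===== SOURCE B (Python) =====
-- def read_after_first_blank_line(file_content):
--     lines = file_content.splitlines()
--     idx = next((i for i, l in enumerate(lines) if l.strip() == ""), None)
--     if idx is None:
--         return ""
--     return '\n'.join(l for l in lines[idx + 1:] if l.strip() != "")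
-- ===== Notes on version B (the rewrite author's own statement) =====
-- stated objective: alternative
-- what changed: Replaces the single stateful flag-driven loop with a locate-the-first-blank-line step (next/enumerate) followed by a filter over the tail slice.
import Mathlib
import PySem

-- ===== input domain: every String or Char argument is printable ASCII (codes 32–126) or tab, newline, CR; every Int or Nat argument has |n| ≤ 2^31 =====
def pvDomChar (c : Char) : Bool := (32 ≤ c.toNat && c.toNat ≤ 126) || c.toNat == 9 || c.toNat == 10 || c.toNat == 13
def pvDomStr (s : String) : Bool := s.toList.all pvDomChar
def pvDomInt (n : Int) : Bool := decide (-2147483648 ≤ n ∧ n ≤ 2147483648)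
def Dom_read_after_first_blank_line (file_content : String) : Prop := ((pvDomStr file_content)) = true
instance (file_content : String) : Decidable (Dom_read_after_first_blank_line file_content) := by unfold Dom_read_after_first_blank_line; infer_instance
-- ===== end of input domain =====

-- B replaces A's flag-driven loop by a locate-first-blank-line step then a filter of the tail (alternative decomposition).

-- ===== PORT A =====
def read_after_first_blank_line (file_content : String) : String :=
  let r := (PySem.Str.splitlines file_content).foldl
    (fun (st : List String × Bool) line =>
      if PySem.Str.strip line == "" then (st.1, true)
      else if st.2 then (st.1 ++ [line], st.2) else st)
    ([], false)
  PySem.Str.join "\n" r.1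

-- ===== PORT B =====
def read_after_first_blank_line_alt (file_content : String) : String :=
  let lines := PySem.Str.splitlines file_content
  match lines.findIdx? (fun l => PySem.Str.strip l == "") with
  | none => ""
  | some i => PySem.Str.join "\n" ((lines.drop (i + 1)).filter (fun l => PySem.Str.strip l != ""))

-- ===== PRECONDITION & SPEC =====
def Spec_read_after_first_blank_line (file_content : String) (out : String) : Prop := out = read_after_first_blank_line_alt file_content
instance (file_content : String) (out : String) : Decidable (Spec_read_after_first_blank_line file_content out) := by unfold Spec_read_after_first_blank_line; infer_instance

-- ===== CLAIM (what is proved, stated in full; the proofs are below) =====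
def Claim_equal_read_after_first_blank_line : Prop := ∀ (file_content : String), Dom_read_after_first_blank_line file_content → Spec_read_after_first_blank_line file_content (read_after_first_blank_line file_content)

-- ===== LEMMAS AND PROOFS =====

-- A's loop body, abstracted over the current (collected lines, flag) state.
def pvStep (st : List String × Bool) (line : String) : List String × Bool :=
  if PySem.Str.strip line == "" then (st.1, true)
  else if st.2 then (st.1 ++ [line], st.2) else st

-- once the flag is true, the loop just filters the remaining lines onto the accumulator
theorem pvFold_true (ls : List String) (acc : List String) :
    ls.foldl pvStep (acc, true) = (acc ++ ls.filter (fun l => PySem.Str.strip l != ""), true) := by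
  induction ls generalizing acc with
  | nil => simp
  | cons l ls ih =>
    by_cases h : PySem.Str.strip l == ""
    · simp [pvStep, h, List.filter, bne, ih]
    · simp [pvStep, h, List.filter, bne, ih, List.append_assoc]

-- before the flag is set, the result is governed by the first blank line's index
theorem pvFold_false (ls : List String) :
    (ls.foldl pvStep ([], false)).1 =
      match ls.findIdx? (fun l => PySem.Str.strip l == "") with
      | none => []
      | some i => (ls.drop (i + 1)).filter (fun l => PySem.Str.strip l != "") := by
  induction ls with
  | nil => simp
  | cons l ls ih =>
    by_cases h : PySem.Str.strip l == ""
    · simp [pvStep, h, List.findIdx?_cons, pvFold_true]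
    · rw [List.foldl_cons]
      have hstep : pvStep ([], false) l = ([], false) := by simp [pvStep, h]
      rw [hstep, ih, List.findIdx?_cons]
      simp [h]
      cases ls.findIdx? (fun l => PySem.Str.strip l == "") <;> simp

-- ===== VERDICT (by name: the statement is the Claim_ definition above) =====
theorem read_after_first_blank_line_spec : Claim_equal_read_after_first_blank_line := by
  intro s _
  unfold Spec_read_after_first_blank_line read_after_first_blank_line read_after_first_blank_line_alt
  have := pvFold_false (PySem.Str.splitlines s)
  simp only [show (fun (st : List String × Bool) line =>
      if PySem.Str.strip line == "" then (st.1, true)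
      else if st.2 then (st.1 ++ [line], st.2) else st) = pvStep from rfl]
  rw [this]
  cases (PySem.Str.splitlines s).findIdx? (fun l => PySem.Str.strip l == "") with
  | none => simp [PySem.Str.join]
  | some i => simp
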